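-- pv_equiv track=rewrite | github.com/MTrifonow/Hackaton | aggregatemin.py | min_tuples_aggregate
-- ===== SOURCE A (Python) =====
-- def min_tuples_aggregate(tuple_list):
--
--     result = {}
--
--     for i, value in tuple_list:
--         if i in result:
--             result[i] = min(result[i], value)
--         else:
--             result[i] = value
--     return result
-- ===== SOURCE B (Python) =====
-- def min_tuples_aggregate(tuple_list):
--     groups = {}
--     for i, value in tuple_list:
--         groups[i] = groups.get(i, []) + [value]
--     return {k: min(vals) for k, vals in groups.items()}
-- ===== Notes on version B (the rewrite author's own statement) =====
-- stated objective: alternative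
-- what changed: B first groups all values per key into lists (one pass building a dict of lists), then reduces each group with min in a separate dict-comprehension pass, instead of A's single pass maintaining a running minimum per key.
import Mathlib
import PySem

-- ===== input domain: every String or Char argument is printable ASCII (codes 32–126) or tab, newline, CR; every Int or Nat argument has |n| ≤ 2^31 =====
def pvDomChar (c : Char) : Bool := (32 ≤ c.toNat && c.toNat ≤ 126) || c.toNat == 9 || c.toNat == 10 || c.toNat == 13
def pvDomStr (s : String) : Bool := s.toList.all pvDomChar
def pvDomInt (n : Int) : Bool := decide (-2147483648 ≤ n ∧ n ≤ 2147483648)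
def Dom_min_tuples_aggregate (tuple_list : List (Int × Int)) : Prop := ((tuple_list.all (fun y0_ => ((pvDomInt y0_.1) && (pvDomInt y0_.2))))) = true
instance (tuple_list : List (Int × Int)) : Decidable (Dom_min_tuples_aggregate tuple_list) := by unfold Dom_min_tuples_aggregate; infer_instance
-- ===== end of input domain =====

-- B groups all values per key first and reduces with min afterwards, instead of
-- keeping a running minimum per key; objective: alternative decomposition, not faster.

-- ===== PORT A =====
-- one loop iteration of A: running minimum per key
def aStep (result : PySem.Dict Int Int) (p : Int × Int) : PySem.Dict Int Int :=
  if result.contains p.1 then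
    -- result[i] is guarded by 'i in result', so the getD default is unreachable
    result.insert p.1 (min (result.getD p.1 p.2) p.2)
  else
    result.insert p.1 p.2

def min_tuples_aggregate (tuple_list : List (Int × Int)) : List (Int × Int) :=
  (tuple_list.foldl aStep PySem.Dict.empty).items

-- ===== PORT B =====
-- groups[i] = groups.get(i, []) + [value]
def bGroupStep (groups : PySem.Dict Int (List Int)) (p : Int × Int) : PySem.Dict Int (List Int) :=
  groups.insert p.1 (groups.getD p.1 [] ++ [p.2])

-- one step of the dict comprehension {k: min(vals) ...}; every vals is nonempty,
-- so the .getD 0 default of min? is unreachable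
def bMinStep (result : PySem.Dict Int Int) (p : Int × List Int) : PySem.Dict Int Int :=
  result.insert p.1 ((PySem.List.min? p.2 (fun y => y)).getD 0)

def min_tuples_aggregate_alt (tuple_list : List (Int × Int)) : List (Int × Int) :=
  ((tuple_list.foldl bGroupStep PySem.Dict.empty).items.foldl bMinStep PySem.Dict.empty).items

-- ===== PRECONDITION & SPEC =====
def Spec_min_tuples_aggregate (tuple_list : List (Int × Int)) (out : List (Int × Int)) : Prop := out = min_tuples_aggregate_alt tuple_list
instance (tuple_list : List (Int × Int)) (out : List (Int × Int)) : Decidable (Spec_min_tuples_aggregate tuple_list out) := by unfold Spec_min_tuples_aggregate; infer_instance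

-- ===== CLAIM (what is proved, stated in full; the proofs are below) =====
def Claim_equal_min_tuples_aggregate : Prop := ∀ (tuple_list : List (Int × Int)), Dom_min_tuples_aggregate tuple_list → Spec_min_tuples_aggregate tuple_list (min_tuples_aggregate tuple_list)

-- ===== LEMMAS AND PROOFS =====

-- running minimum of a list of values, starting from an optional previous value
def mcomb (o : Option Int) (vs : List Int) : Option Int :=
  vs.foldl (fun acc v => some (match acc with | none => v | some w => min w v)) o

theorem mcomb_cons (o : Option Int) (v : Int) (vs : List Int) :
    mcomb o (v :: vs) = mcomb (some (match o with | none => v | some w => min w v)) vs := rfl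

theorem mcomb_some (w : Int) (vs : List Int) : mcomb (some w) vs = some (vs.foldl min w) := by
  induction vs generalizing w with
  | nil => rfl
  | cons v t ih => rw [mcomb_cons, ih]; rfl

-- the value A's loop holds at key k, in terms of the incoming dict and the filtered values
theorem getA (l : List (Int × Int)) (d : PySem.Dict Int Int) (k : Int) :
    (l.foldl aStep d).get? k = mcomb (d.get? k) ((l.filter (fun p => p.1 == k)).map Prod.snd) := by
  induction l generalizing d with
  | nil => rfl
  | cons p t ih =>
    rw [List.foldl_cons, ih]
    by_cases hk : p.1 = k
    · have hfil : (p :: t).filter (fun p => p.1 == k) = p :: t.filter (fun p => p.1 == k) := by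
        simp [hk]
      rw [hfil, List.map_cons, mcomb_cons]
      congr 1
      subst hk
      unfold aStep
      by_cases hc : d.contains p.1
      · rw [if_pos hc]
        rcases ho : d.get? p.1 with _ | w
        · exact absurd (PySem.Dict.contains_eq_isSome_get? d p.1 ▸ hc) (by simp [ho])
        · rw [PySem.Dict.get?_insert_self]
          simp [PySem.Dict.getD_eq_get?_getD, ho]
      · rw [if_neg hc, PySem.Dict.get?_insert_self]
        rcases ho : d.get? p.1 with _ | w
        · rfl
        · exact absurd (PySem.Dict.contains_eq_isSome_get? d p.1 ▸ hc) (by simp [ho])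
    · have hfil : (p :: t).filter (fun p => p.1 == k) = t.filter (fun p => p.1 == k) := by
        simp [hk]
      rw [hfil]
      congr 1
      unfold aStep
      split <;> rw [PySem.Dict.get?_insert, if_neg (fun h => hk (Eq.symm h))]

-- A's step written in the plain insert shape used by the keys lemmas
theorem aStep_insert_shape :
    aStep = fun d p => d.insert p.1 (if d.contains p.1 then min (d.getD p.1 p.2) p.2 else p.2) := by
  funext d p; unfold aStep; split <;> simp_all

-- B's grouping step is the modify shape of getD_foldl_modify_append
theorem bGroupStep_modify_shape :
    bGroupStep = fun d p => d.modify p.1 [] (· ++ [p.2]) := by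
  funext d p; simp [bGroupStep, PySem.Dict.modify]

theorem keysA (l : List (Int × Int)) :
    (l.foldl aStep PySem.Dict.empty).keys = PySem.Set.ofList (l.map Prod.fst) := by
  rw [aStep_insert_shape, PySem.Dict.keys_foldl_insert_key, PySem.Dict.keys_empty]; rfl

theorem nodupA (l : List (Int × Int)) : (l.foldl aStep PySem.Dict.empty).keys.Nodup := by
  rw [aStep_insert_shape]
  exact PySem.Dict.nodup_keys_foldl_insert_key _ _ _ _ (by simp [PySem.Dict.keys_empty])

theorem keysG (l : List (Int × Int)) :
    (l.foldl bGroupStep PySem.Dict.empty).keys = PySem.Set.ofList (l.map Prod.fst) := by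
  rw [show bGroupStep = fun d p => d.insert p.1 (d.getD p.1 [] ++ [p.2]) from rfl,
    PySem.Dict.keys_foldl_insert_key, PySem.Dict.keys_empty]; rfl

theorem nodupG (l : List (Int × Int)) : (l.foldl bGroupStep PySem.Dict.empty).keys.Nodup := by
  rw [show bGroupStep = fun d p => d.insert p.1 (d.getD p.1 [] ++ [p.2]) from rfl]
  exact PySem.Dict.nodup_keys_foldl_insert_key _ _ _ _ (by simp [PySem.Dict.keys_empty])

theorem getDG (l : List (Int × Int)) (k : Int) :
    (l.foldl bGroupStep PySem.Dict.empty).getD k [] = (l.filter (fun p => p.1 == k)).map Prod.snd := by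
  rw [bGroupStep_modify_shape, PySem.Dict.getD_foldl_modify_append, PySem.Dict.getD_empty]
  simp

-- ===== VERDICT (by name: the statement is the Claim_ definition above) =====
theorem min_tuples_aggregate_spec : Claim_equal_min_tuples_aggregate := by
  intro l _
  unfold Spec_min_tuples_aggregate min_tuples_aggregate min_tuples_aggregate_alt
  have hRitems : ((l.foldl bGroupStep PySem.Dict.empty).items.foldl bMinStep PySem.Dict.empty).items
      = (l.foldl bGroupStep PySem.Dict.empty).items.map
          (fun p => (p.1, (PySem.List.min? p.2 (fun y => y)).getD 0)) := by
    have := PySem.Dict.items_foldl_insert_fresh (l := (l.foldl bGroupStep PySem.Dict.empty).items)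
      (k := Prod.fst)
      (v := fun p => (PySem.List.min? p.2 (fun y => y)).getD 0) (d := PySem.Dict.empty)
      (by intro a _; exact PySem.Dict.contains_empty _)
      (by exact nodupG l)
    simpa [bMinStep] using this
  rw [hRitems]
  rw [PySem.Dict.items_eq_map_keys _ (nodupA l) 0,
      PySem.Dict.items_eq_map_keys (l.foldl bGroupStep PySem.Dict.empty) (nodupG l) [],
      List.map_map, keysA, keysG]
  apply List.map_congr_left
  intro k hk
  have hkmem : k ∈ l.map Prod.fst := (PySem.Set.mem_ofList _ _).mp hk
  obtain ⟨p, hp, hpk⟩ := List.mem_map.mp hkmem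
  have hvals : (l.filter (fun p => p.1 == k)).map Prod.snd ≠ [] := by
    have hmem : p ∈ l.filter (fun p => p.1 == k) := List.mem_filter.mpr ⟨hp, by simp [hpk]⟩
    intro h
    have h' := List.map_eq_nil_iff.mp h
    simp [h'] at hmem
  rcases hv : (l.filter (fun p => p.1 == k)).map Prod.snd with _ | ⟨v, vs⟩
  · exact absurd hv hvals
  · have hA : (l.foldl aStep PySem.Dict.empty).getD k 0 = vs.foldl min v := by
      rw [PySem.Dict.getD_eq_get?_getD, getA, PySem.Dict.get?_empty, hv, mcomb_cons]
      simp [mcomb_some]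
    simp only [Function.comp]
    rw [hA, getDG, hv, PySem.List.min?_id_cons]
    rfl
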